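-- pv_equiv track=rewrite | github.com/aorursy/KT_dataset_py | kiri8128_kernelc0abe2157c.py | difList
-- ===== SOURCE A (Python) =====
-- def difList(a, b):
--     # 共通部分を除いたときの左右それぞれの残存数
--     for aa in a:
--         if aa in b:
--             a.remove(aa)
--             b.remove(aa)
--             return difList(a, b)
--     for bb in b:
--         if bb in a:
--             a.remove(bb)
--             b.remove(bb)
--             return difList(a, b)
--     return len(a), len(b)
-- ===== SOURCE B (Python) =====
-- def difList(a, b):
--     # Count occurrences once, then subtract the multiset-intersection size
--     # from each length (closed form; does not mutate a/b, unlike A).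
--     cb = {}
--     for x in b:
--         cb[x] = cb.get(x, 0) + 1
--     ca = {}
--     for x in a:
--         ca[x] = ca.get(x, 0) + 1
--     t = 0
--     for v, c in ca.items():
--         t += min(c, cb.get(v, 0))
--     return (len(a) - t, len(b) - t)
-- ===== Notes on version B (the rewrite author's own statement) =====
-- stated objective: faster
-- what changed: Replaced the repeated scan-remove-recurse with two hash counters built in one pass each and a closed-form result (len minus multiset-intersection size); B does not mutate its arguments.
import Mathlib
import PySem

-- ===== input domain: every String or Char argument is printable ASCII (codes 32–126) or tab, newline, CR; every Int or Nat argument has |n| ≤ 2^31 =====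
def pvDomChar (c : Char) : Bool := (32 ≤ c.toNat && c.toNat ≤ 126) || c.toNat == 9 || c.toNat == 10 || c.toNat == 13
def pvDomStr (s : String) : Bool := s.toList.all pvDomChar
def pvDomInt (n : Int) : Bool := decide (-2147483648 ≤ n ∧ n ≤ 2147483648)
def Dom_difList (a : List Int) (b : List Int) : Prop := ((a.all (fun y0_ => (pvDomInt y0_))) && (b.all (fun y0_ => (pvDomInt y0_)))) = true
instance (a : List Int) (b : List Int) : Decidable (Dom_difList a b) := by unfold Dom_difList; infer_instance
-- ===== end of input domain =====

-- B replaces A's scan-remove-recurse with two counting dicts and a closed-form result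
-- (length minus multiset-intersection size); A mutates its list arguments, B does not —
-- the equivalence proved here is about the RETURN value only.

-- ===== PORT A =====
-- for aa in a: if aa in b: a.remove(aa); b.remove(aa); return difList(a,b)  — the element found
-- is a's first element that is in b, so remove(aa) erases exactly that first occurrence.
def difList (a : List Int) (b : List Int) : Int × Int :=
  match h1 : a.find? (fun x => b.contains x) with
  | some x => difList (a.erase x) (b.erase x)
  | none =>
    match h2 : b.find? (fun x => a.contains x) with
    | some x => difList (a.erase x) (b.erase x)
    | none => ((a.length : Int), (b.length : Int))
termination_by a.length
decreasing_by
  · have hx : x ∈ a := List.mem_of_find?_eq_some h1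
    have := List.length_erase_of_mem hx
    have : 0 < a.length := List.length_pos_of_mem hx
    omega
  · have hx : a.contains x = true := of_decide_eq_true (by simpa using List.find?_some h2)
    have hx' : x ∈ a := by simpa using hx
    have := List.length_erase_of_mem hx'
    have : 0 < a.length := List.length_pos_of_mem hx'
    omega

-- ===== PORT B =====
def difList_alt (a : List Int) (b : List Int) : Int × Int :=
  let cb : PySem.Dict Int Int := b.foldl (fun d x => d.insert x (d.getD x 0 + 1)) PySem.Dict.empty
  let ca : PySem.Dict Int Int := a.foldl (fun d x => d.insert x (d.getD x 0 + 1)) PySem.Dict.empty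
  let t : Int := ca.items.foldl (fun acc p => acc + min p.2 (cb.getD p.1 0)) 0
  ((a.length : Int) - t, (b.length : Int) - t)

-- ===== PRECONDITION & SPEC =====
def Spec_difList (a : List Int) (b : List Int) (out : Int × Int) : Prop := out = difList_alt a b
instance (a : List Int) (b : List Int) (out : Int × Int) : Decidable (Spec_difList a b out) := by unfold Spec_difList; infer_instance

-- ===== CLAIM (what is proved, stated in full; the proofs are below) =====
def Claim_equal_difList : Prop := ∀ (a : List Int) (b : List Int), Dom_difList a b → Spec_difList a b (difList a b)

-- ===== LEMMAS AND PROOFS =====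

-- the multiset-intersection size: the number of elements A's recursion removes from each list
def pvN (a b : List Int) : Nat := Multiset.card ((a : Multiset Int) ∩ (b : Multiset Int))

lemma pvInter_erase (s t : Multiset Int) (x : Int) (hs : x ∈ s) (ht : x ∈ t) :
    (s.erase x) ∩ (t.erase x) = (s ∩ t).erase x := by
  ext y
  by_cases hy : y = x
  · subst hy
    have h1 : 1 ≤ s.count y := Multiset.one_le_count_iff_mem.mpr hs
    have h2 : 1 ≤ t.count y := Multiset.one_le_count_iff_mem.mpr ht
    simp [Multiset.count_inter, Multiset.count_erase_self]
    omega
  · simp [Multiset.count_inter, Multiset.count_erase_of_ne hy]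

lemma pvN_erase (a b : List Int) (x : Int) (ha : x ∈ a) (hb : x ∈ b) :
    pvN (a.erase x) (b.erase x) = pvN a b - 1 ∧ 1 ≤ pvN a b := by
  have hmem : x ∈ (a : Multiset Int) ∩ (b : Multiset Int) := by
    rw [Multiset.mem_inter]; exact ⟨by simpa using ha, by simpa using hb⟩
  constructor
  · unfold pvN
    rw [← Multiset.coe_erase, ← Multiset.coe_erase,
      pvInter_erase _ _ x (by simpa using ha) (by simpa using hb),
      Multiset.card_erase_of_mem hmem]
    rfl
  · unfold pvN
    have : 0 < Multiset.card ((a : Multiset Int) ∩ (b : Multiset Int)) :=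
      Multiset.card_pos_iff_exists_mem.mpr ⟨x, hmem⟩
    omega

lemma pvN_disjoint (a b : List Int) (h : ∀ x ∈ a, x ∉ b) : pvN a b = 0 := by
  unfold pvN
  have : (a : Multiset Int) ∩ (b : Multiset Int) = 0 := by
    ext y
    simp only [Multiset.count_inter, Multiset.coe_count, Multiset.count_zero, Nat.min_eq_zero_iff]
    by_cases hy : y ∈ a
    · exact Or.inr (List.count_eq_zero.mpr (h y hy))
    · exact Or.inl (List.count_eq_zero.mpr hy)
  rw [this]; rfl

-- A computes the closed form: each recursion step removes one common element from both lists.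
lemma difList_closed (a b : List Int) :
    difList a b = ((a.length : Int) - pvN a b, (b.length : Int) - pvN a b) := by
  fun_induction difList a b with
  | case1 a b x h1 ih =>
    have hxa : x ∈ a := List.mem_of_find?_eq_some h1
    have hxb : x ∈ b := by
      have := List.find?_some h1; simpa using this
    obtain ⟨hN, hN1⟩ := pvN_erase a b x hxa hxb
    rw [ih, List.length_erase_of_mem hxa, List.length_erase_of_mem hxb, hN]
    have hal : 0 < a.length := List.length_pos_of_mem hxa
    have hbl : 0 < b.length := List.length_pos_of_mem hxb
    simp only [Prod.mk.injEq]
    constructor <;> omega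
  | case2 a b h1 x h2 ih =>
    exfalso
    have hxb : x ∈ b := List.mem_of_find?_eq_some h2
    have hxa : x ∈ a := by
      have := List.find?_some h2; simpa using this
    have := List.find?_eq_none.mp h1 x hxa
    simp [hxb] at this
  | case3 a b h1 h2 =>
    have hdisj : ∀ x ∈ a, x ∉ b := by
      intro x hx hxb
      have := List.find?_eq_none.mp h1 x hx
      simp [hxb] at this
    rw [pvN_disjoint a b hdisj]
    simp

-- B's per-value sum of min-counts is exactly the multiset-intersection size.
lemma pvSum_eq_pvN (a b : List Int) :
    ((PySem.Set.ofList a).map (fun v => min ((a.count v : Int)) ((b.count v : Int)))).sum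
      = (pvN a b : Int) := by
  have hnd : (PySem.Set.ofList a).Nodup := PySem.Set.nodup_ofList a
  rw [← List.sum_toFinset _ hnd]
  have hfs : (PySem.Set.ofList a).toFinset = a.toFinset := by
    apply Finset.ext
    intro v
    simp [PySem.Set.mem_ofList]
  rw [hfs]
  have hN : (pvN a b : Int)
      = ((∑ v ∈ a.toFinset, min (a.count v) (b.count v) : Nat) : Int) := by
    congr 1
    unfold pvN
    rw [← Multiset.toFinset_sum_count_eq ((a : Multiset Int) ∩ (b : Multiset Int))]
    have hsub : ((a : Multiset Int) ∩ (b : Multiset Int)).toFinset ⊆ a.toFinset := by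
      intro v hv
      have hv' : v ∈ (a : Multiset Int) ∩ (b : Multiset Int) := by simpa using hv
      have : v ∈ a := by
        have := (Multiset.mem_inter.mp hv').1; simpa using this
      simpa using this
    have hzero : ∀ v ∈ a.toFinset, v ∉ ((a : Multiset Int) ∩ (b : Multiset Int)).toFinset →
        Multiset.count v ((a : Multiset Int) ∩ (b : Multiset Int)) = 0 := by
      intro v _ hv
      have : v ∉ (a : Multiset Int) ∩ (b : Multiset Int) := by simpa using hv
      exact Multiset.count_eq_zero.mpr this
    rw [Finset.sum_subset hsub hzero]
    apply Finset.sum_congr rfl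
    intro v _
    simp
  rw [hN]
  push_cast
  rfl

lemma difList_alt_closed (a b : List Int) :
    difList_alt a b = ((a.length : Int) - pvN a b, (b.length : Int) - pvN a b) := by
  simp only [difList_alt]
  rw [PySem.Dict.foldl_insert_getD_add_one_eq_counter,
    PySem.Dict.foldl_insert_getD_add_one_eq_counter]
  rw [PySem.List.foldl_add (l := (PySem.Dict.counter a).items) (a := 0)
    (g := fun p => min p.2 ((PySem.Dict.counter b).getD p.1 0))]
  rw [PySem.Dict.items_counter, List.map_map]
  have : ((fun p : Int × Int => min p.2 ((PySem.Dict.counter b).getD p.1 0)) ∘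
      fun k => (k, (a.count k : Int)))
      = fun v => min ((a.count v : Int)) ((b.count v : Int)) := by
    funext v
    simp [PySem.Dict.getD_counter]
  rw [this, pvSum_eq_pvN]
  simp

-- ===== VERDICT (by name: the statement is the Claim_ definition above) =====
theorem difList_spec : Claim_equal_difList := by
  intro a b _
  unfold Spec_difList
  rw [difList_closed, difList_alt_closed]
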